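-- pv_equiv track=rewrite | github.com/lukaszdworako/PCRS_236_Parsons | pcrs/languages/c/visualizer/cg_stacktrace_functions.py | remove_from_string_token_range
-- ===== SOURCE A (Python) =====
-- def remove_from_string_token_range(token_list, line):
--     """Remove substring from string using a token pattern"""
--     # Consider only quote pairs (open and a close quote)
--     size_readjust = 0
--     while len(token_list) > 0 and len(token_list) % 2 == 0:
--         token_list[0] = token_list[0] - size_readjust
--         token_list[1] = token_list[1] - size_readjust
--         quote_start = token_list[0]
--         quote_end = token_list[1]
--         line = line[:quote_start] + line[quote_end+1:]
--         token_list.remove(quote_start)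
--         token_list.remove(quote_end)
--         size_readjust += quote_end - quote_start + 1
--     return line
-- ===== SOURCE B (Python) =====
-- def remove_from_string_token_range(token_list, line):
--     """Remove substring from string using a token pattern"""
--     # One pass: collect the kept segments between the (start, end) pairs, then join.
--     if len(token_list) % 2:
--         return line
--     parts = []
--     prev = 0
--     for i in range(0, len(token_list), 2):
--         start, end = token_list[i], token_list[i + 1]
--         parts.append(line[prev:start])
--         prev = end + 1
--     parts.append(line[prev:])
--     return "".join(parts)
-- ===== Notes on version B (the rewrite author's own statement) =====
-- stated objective: faster
-- what changed: A repeatedly rebuilds the whole string (one copy per pair) while re-adjusting and popping the remaining tokens; B makes a single pass over the index pairs, collecting the kept segments of the original string and joining them once.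
-- outside the precondition, e.g. on remove_from_string_token_range([5, 6, 1, 2], 'abcdefgh'): A returns 'abcdebcdeh', B returns 'abcdedefgh'
import Mathlib
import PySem

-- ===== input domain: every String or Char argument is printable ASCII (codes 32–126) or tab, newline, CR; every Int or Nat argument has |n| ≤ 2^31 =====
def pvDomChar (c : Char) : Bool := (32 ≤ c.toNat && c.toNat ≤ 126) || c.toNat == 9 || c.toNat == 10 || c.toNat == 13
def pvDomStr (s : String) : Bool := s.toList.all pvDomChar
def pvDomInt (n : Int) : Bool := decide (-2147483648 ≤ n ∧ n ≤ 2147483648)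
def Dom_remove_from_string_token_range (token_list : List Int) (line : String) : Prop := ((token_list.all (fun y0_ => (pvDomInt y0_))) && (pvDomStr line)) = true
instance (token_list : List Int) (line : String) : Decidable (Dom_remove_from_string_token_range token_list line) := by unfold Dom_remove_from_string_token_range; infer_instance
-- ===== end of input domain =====

-- B replaces A's iterative delete-and-reindex loop (a fresh string copy per pair) by one pass
-- that collects the kept segments between the pairs and joins them (objective: faster).
-- Python's A empties token_list in place; the equivalence proved here is about the RETURN value only.

-- ===== PORT A =====
-- A's loop body pops the first two (re-adjusted) tokens via remove-by-value: since
-- token_list[0]/[1] were just assigned those very values, `remove?` always hits the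
-- front cell and returns `some`; the `.getD []` branch is unreachable.
def pvCutA (t : List Int) (line : List Char) (size_readjust : Int) : List Char :=
  match t with
  | a :: b :: rest =>
    if (a :: b :: rest).length % 2 = 0 then
      let quote_start := a - size_readjust
      let quote_end := b - size_readjust
      let line' := PySem.List.slice line none (some quote_start) ++
                   PySem.List.slice line (some (quote_end + 1)) none
      let t1 := (PySem.List.remove? (quote_start :: quote_end :: rest) quote_start).getD []
      let t2 := (PySem.List.remove? t1 quote_end).getD []
      pvCutA t2 line' (size_readjust + (quote_end - quote_start + 1))
    else line
  | _ => line
termination_by t.length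
decreasing_by simp

def remove_from_string_token_range (token_list : List Int) (line : String) : String :=
  String.ofList (pvCutA token_list line.toList 0)

-- ===== PORT B =====
-- Source B's loop over index pairs, collecting line[prev:start] and finally line[prev:].
def pvSegsB (t : List Int) (prev : Int) (line : List Char) : List (List Char) :=
  match t with
  | s :: e :: rest => PySem.List.slice line (some prev) (some s) :: pvSegsB rest (e + 1) line
  | _ => [PySem.List.slice line (some prev) none]

def remove_from_string_token_range_alt (token_list : List Int) (line : String) : String :=
  if token_list.length % 2 = 1 then line
  else String.ofList (PySem.Chars.join [] (pvSegsB token_list 0 line.toList))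

-- ===== PRECONDITION & SPEC =====
-- Pre_ admits every token list that is odd-length (the loop never runs), of length ≤ 2 (at
-- most one pair: a single two-slice cut, identical in both programs), or a strictly
-- increasing list of non-negative indices — the quote-pair positions the function is meant
-- for.  It excludes only lists of ≥ 2 pairs that are unsorted, overlapping or negative:
-- there the inclusive ranges are not well-defined positions of the line, and A's value
-- (obtained by Python's negative/overlapping slice clamping applied to the shifted indices)
-- and B's value are both accidental — neither is the specified one.
def Pre_remove_from_string_token_range (token_list : List Int) (line : String) : Prop :=
  token_list.length % 2 = 1 ∨ token_list.length ≤ 2 ∨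
    (List.Pairwise (· < ·) token_list ∧ ∀ x ∈ token_list, 0 ≤ x)
instance (token_list : List Int) (line : String) : Decidable (Pre_remove_from_string_token_range token_list line) := by unfold Pre_remove_from_string_token_range; infer_instance

def pvWitness_remove_from_string_token_range : List Int × String := ([1, 3], "abcdef")

def Spec_remove_from_string_token_range (token_list : List Int) (line : String) (out : String) : Prop := out = remove_from_string_token_range_alt token_list line
instance (token_list : List Int) (line : String) (out : String) : Decidable (Spec_remove_from_string_token_range token_list line out) := by unfold Spec_remove_from_string_token_range; infer_instance

-- ===== CLAIM (what is proved, stated in full; the proofs are below) =====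
def Claim_equal_remove_from_string_token_range : Prop := ∀ (token_list : List Int) (line : String), Dom_remove_from_string_token_range token_list line → Pre_remove_from_string_token_range token_list line → Spec_remove_from_string_token_range token_list line (remove_from_string_token_range token_list line)

-- ===== LEMMAS AND PROOFS =====

-- joining with the empty separator is flattening
lemma pvJoin_empty (ps : List (List Char)) : PySem.Chars.join [] ps = ps.flatten := by
  show List.intercalate [] ps = ps.flatten
  induction ps with
  | nil => rfl
  | cons a t ih => cases t <;> simp_all [List.intercalate, List.intersperse]

lemma pvCutA_odd (t : List Int) (line : List Char) (adj : Int)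
    (h : t.length % 2 = 1) : pvCutA t line adj = line := by
  match t with
  | [] => simp [pvCutA]
  | [x] => simp [pvCutA]
  | a :: b :: rest =>
    rw [pvCutA]
    simp only [List.length_cons] at h ⊢
    rw [if_neg (by omega)]

lemma slice_nil (a b : Option Int) : PySem.List.slice ([]:List Char) a b = [] := by
  simp [PySem.List.slice]

lemma pvCutA_nil : ∀ (t : List Int) (adj : Int), pvCutA t [] adj = []
  | [], _ => by simp [pvCutA]
  | [x], _ => by simp [pvCutA]
  | a :: b :: rest, adj => by
    rw [pvCutA]
    simp only [PySem.List.remove?_cons_self, Option.getD_some, slice_nil, List.append_nil]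
    split
    · exact pvCutA_nil rest _
    · rfl
termination_by t _ => t.length

lemma pvSegsB_past : ∀ (w : List Int) (line : List Char) (prev : Int),
    (line.length : Int) ≤ prev → (∀ x ∈ w, (line.length : Int) ≤ x) →
    (pvSegsB w prev line).flatten = []
  | [], line, prev, hp, hw => by
    simp only [pvSegsB]
    rw [PySem.List.slice_from line (by omega : (0:Int) ≤ prev)]
    simp [List.drop_eq_nil_iff]
    omega
  | [x], line, prev, hp, hw => by
    simp only [pvSegsB]
    rw [PySem.List.slice_from line (by omega : (0:Int) ≤ prev)]
    simp [List.drop_eq_nil_iff]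
    omega
  | s :: e :: rw, line, prev, hp, hw => by
    have hs : (line.length : Int) ≤ s := hw s (by simp)
    have he : (line.length : Int) ≤ e := hw e (by simp)
    simp only [pvSegsB]
    rw [List.flatten_cons, PySem.List.slice_toNat line (by omega : (0:Int) ≤ prev) (by omega : (0:Int) ≤ s),
        pvSegsB_past rw line (e+1) (by omega) (fun x hx => hw x (by simp [hx]))]
    have hnil : line.drop prev.toNat = [] := by rw [List.drop_eq_nil_iff]; omega
    simp [hnil]

lemma pvSegsB_shift : ∀ (w : List Int) (line : List Char) (m : Nat) (prev : Int),
    (m : Int) ≤ prev → (∀ x ∈ w, (m : Int) ≤ x) →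
    pvSegsB (w.map (· - (m : Int))) (prev - m) (line.drop m) = pvSegsB w prev line
  | [], line, m, prev, hm, hw => by
    simp only [List.map_nil, pvSegsB]
    rw [PySem.List.slice_from (line.drop m) (by omega : (0:Int) ≤ prev - m),
        PySem.List.slice_from line (by omega : (0:Int) ≤ prev), List.drop_drop]
    have : m + (prev - (m:Int)).toNat = prev.toNat := by omega
    rw [this]
  | [x], line, m, prev, hm, hw => by
    simp only [List.map_cons, List.map_nil, pvSegsB]
    rw [PySem.List.slice_from (line.drop m) (by omega : (0:Int) ≤ prev - m),
        PySem.List.slice_from line (by omega : (0:Int) ≤ prev), List.drop_drop]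
    have : m + (prev - (m:Int)).toNat = prev.toNat := by omega
    rw [this]
  | s :: e :: rw, line, m, prev, hm, hw => by
    have hs : (m:Int) ≤ s := hw s (by simp)
    have he : (m:Int) ≤ e := hw e (by simp)
    simp only [List.map_cons, pvSegsB]
    have harith : (e - (m:Int)) + 1 = (e + 1) - m := by ring
    rw [harith, pvSegsB_shift rw line m (e+1) (by omega) (fun x hx => hw x (by simp [hx]))]
    have hseg : PySem.List.slice (line.drop m) (some (prev - m)) (some (s - m)) =
        PySem.List.slice line (some prev) (some s) := by
      rw [PySem.List.slice_toNat (line.drop m) (by omega : (0:Int) ≤ prev - m) (by omega : (0:Int) ≤ s - m),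
          PySem.List.slice_toNat line (by omega : (0:Int) ≤ prev) (by omega : (0:Int) ≤ s),
          List.drop_drop]
      have h1 : m + (prev - (m:Int)).toNat = prev.toNat := by omega
      have h2 : (s - (m:Int)).toNat - (prev - (m:Int)).toNat = s.toNat - prev.toNat := by omega
      rw [h1, h2]
    rw [hseg]

lemma pvCutA_append : ∀ (t : List Int) (u v : List Char) (adj : Int),
    List.Pairwise (· < ·) t → (∀ x ∈ t, adj + u.length ≤ x) →
    pvCutA t (u ++ v) adj = u ++ pvCutA t v (adj + u.length)
  | [], u, v, adj, hc, hb => by simp [pvCutA]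
  | [x], u, v, adj, hc, hb => by simp [pvCutA]
  | a :: b :: rest, u, v, adj, hc, hb => by
    rw [List.pairwise_cons] at hc
    obtain ⟨ha, hc⟩ := hc
    rw [List.pairwise_cons] at hc
    obtain ⟨hbrest, hcrest⟩ := hc
    have hab : a < b := ha b (by simp)
    have hua : adj + (u.length : Int) ≤ a := hb a (by simp)
    simp only [pvCutA, PySem.List.remove?_cons_self, Option.getD_some, List.length_cons]
    by_cases hpar : (rest.length + 1 + 1) % 2 = 0
    · rw [if_pos hpar, if_pos hpar]
      have e1 : PySem.List.slice (u ++ v) none (some (a - adj)) =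
          u ++ v.take ((a - adj).toNat - u.length) := by
        rw [PySem.List.slice_to (u ++ v) (by omega : (0:Int) ≤ a - adj), List.take_append,
            List.take_of_length_le (by omega : u.length ≤ (a - adj).toNat)]
      have e2 : PySem.List.slice (u ++ v) (some (b - adj + 1)) none =
          v.drop ((b - adj + 1).toNat - u.length) := by
        rw [PySem.List.slice_from (u ++ v) (by omega : (0:Int) ≤ b - adj + 1), List.drop_append,
            List.drop_eq_nil_of_le (by omega : u.length ≤ (b - adj + 1).toNat), List.nil_append]
      have e3 : PySem.List.slice v none (some (a - (adj + u.length))) =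
          v.take ((a - adj).toNat - u.length) := by
        rw [PySem.List.slice_to v (by omega : (0:Int) ≤ a - (adj + u.length))]
        congr 1
        omega
      have e4 : PySem.List.slice v (some (b - (adj + u.length) + 1)) none =
          v.drop ((b - adj + 1).toNat - u.length) := by
        rw [PySem.List.slice_from v (by omega : (0:Int) ≤ b - (adj + u.length) + 1)]
        congr 1
        omega
      rw [e1, e2, e3, e4, List.append_assoc,
          pvCutA_append rest u (v.take ((a - adj).toNat - u.length) ++ v.drop ((b - adj + 1).toNat - u.length))
            (adj + (b - adj - (a - adj) + 1)) hcrest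
            (fun x hx => by have := hbrest x hx; omega)]
      congr 2
      ring
    · rw [if_neg hpar, if_neg hpar]

lemma pvCutA_eq_segs : ∀ (t : List Int) (line : List Char) (adj : Int),
    t.length % 2 = 0 → List.Pairwise (· < ·) t → (∀ x ∈ t, adj ≤ x) →
    pvCutA t line adj = (pvSegsB (t.map (· - adj)) 0 line).flatten
  | [], line, adj, _, _, _ => by
    simp only [pvCutA, List.map_nil, pvSegsB, List.flatten]
    rw [PySem.List.slice_from line (by norm_num : (0:Int) ≤ 0)]
    simp
  | [x], line, adj, hpar, _, _ => by simp at hpar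
  | a :: b :: rest, line, adj, hpar, hc, hb => by
    rw [List.pairwise_cons] at hc
    obtain ⟨ha, hc⟩ := hc
    rw [List.pairwise_cons] at hc
    obtain ⟨hbrest, hcrest⟩ := hc
    have hab : a < b := ha b (by simp)
    have haadj : adj ≤ a := hb a (by simp)
    have hparr : rest.length % 2 = 0 := by simp at hpar; omega
    simp only [pvCutA, PySem.List.remove?_cons_self, Option.getD_some, List.length_cons,
      List.map_cons, pvSegsB, List.flatten_cons]
    rw [if_pos (by omega : (rest.length + 1 + 1) % 2 = 0)]
    rw [PySem.List.slice_to line (by omega : (0:Int) ≤ a - adj),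
        PySem.List.slice_from line (by omega : (0:Int) ≤ b - adj + 1)]
    rw [pvCutA_append rest (line.take (a - adj).toNat) (line.drop ((b - adj + 1).toNat))
          (adj + (b - adj - (a - adj) + 1)) hcrest
          (fun x hx => by
            have hx' := hbrest x hx
            have hlen : (line.take (a - adj).toNat).length = min ((a - adj).toNat) line.length :=
              List.length_take
            rw [hlen]; omega)]
    have hhead : PySem.List.slice line (some 0) (some (a - adj)) = line.take (a - adj).toNat := by
      rw [PySem.List.slice_toNat line (by norm_num : (0:Int) ≤ 0) (by omega : (0:Int) ≤ a - adj)]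
      simp
    rw [hhead]
    congr 1
    by_cases hcase : (a - adj).toNat ≤ line.length
    · have hul : ((line.take (a - adj).toNat).length : Int) = a - adj := by
        rw [List.length_take]; omega
      have hadj : adj + (b - adj - (a - adj) + 1) + ((line.take (a - adj).toNat).length : Int) = b + 1 := by
        rw [hul]; ring
      rw [hadj, pvCutA_eq_segs rest (line.drop ((b - adj + 1).toNat)) (b + 1) hparr hcrest
            (fun x hx => by have := hbrest x hx; omega)]
      have hm : (((b - adj + 1).toNat : Int)) = b - adj + 1 := Int.toNat_of_nonneg (by omega)
      rw [← pvSegsB_shift (rest.map (· - adj)) line ((b - adj + 1).toNat) (b - adj + 1)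
            (by omega)
            (fun x hx => by
              obtain ⟨r, hr, rfl⟩ := List.mem_map.mp hx
              have := hbrest r hr
              omega)]
      have hmap : List.map ((fun x => x - (((b - adj + 1).toNat : Nat) : Int)) ∘ fun x => x - adj) rest
          = List.map (fun x => x - (b + 1)) rest :=
        List.map_congr_left (fun x hx => by simp only [Function.comp_apply]; omega)
      have hprev : b - adj + 1 - (((b - adj + 1).toNat : Nat) : Int) = 0 := by omega
      simp only [List.map_map]
      rw [hmap, hprev]
    · have hu : line.take (a - adj).toNat = line := List.take_of_length_le (by omega)
      have hv : line.drop ((b - adj + 1).toNat) = [] := List.drop_eq_nil_of_le (by omega)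
      rw [hv, pvCutA_nil]
      rw [pvSegsB_past (rest.map (· - adj)) line (b - adj + 1) (by omega)
            (fun x hx => by
              obtain ⟨r, hr, rfl⟩ := List.mem_map.mp hx
              have := hbrest r hr
              omega)]

-- ===== VERDICT (by name: the statement is the Claim_ definition above) =====
theorem remove_from_string_token_range_spec : Claim_equal_remove_from_string_token_range := by
  intro t line _ hpre
  unfold Spec_remove_from_string_token_range
  unfold remove_from_string_token_range remove_from_string_token_range_alt
  rcases Nat.mod_two_eq_zero_or_one t.length with hpar | hpar
  · rw [if_neg (by omega), pvJoin_empty]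
    rcases hpre with h1 | h2 | ⟨hc, hb⟩
    · omega
    · match t with
      | [] =>
        simp only [pvCutA, pvSegsB, List.flatten]
        rw [PySem.List.slice_from line.toList (by norm_num : (0:Int) ≤ 0)]
        simp
      | [a, b] =>
        simp [pvCutA, pvSegsB, PySem.List.remove?_cons_self]
      | [x] => simp at hpar
      | a :: b :: c :: rest => simp at h2
    · have h := pvCutA_eq_segs t line.toList 0 hpar hc hb
      have hmap : t.map (· - (0:Int)) = t := by simp
      rw [hmap] at h
      rw [h]
  · rw [if_pos hpar, pvCutA_odd t line.toList 0 hpar, String.ofList_toList]
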